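-- pv_equiv track=rewrite | github.com/JeffersonChen888/HypoEvolve | pipeline/utils/druggability_extractor.py | _extract_subcellular_location
-- ===== SOURCE A (Python) =====
-- from typing import Dict, List, Optional, Any
--
-- def _extract_subcellular_location(target_data: Dict) -> str:
--     """
--     Extract subcellular location from target data.
--
--     Returns only broad categories to prevent identification.
--
--     Args:
--         target_data: OpenTargets target data
--
--     Returns:
--         Subcellular location: One of Membrane, Cytoplasm, Nucleus, Secreted, Unknown
--     """
--     locations = target_data.get("subcellularLocations", [])
--
--     if locations:
--         location_set = set()
--         for loc in locations:
--             loc_name = loc.get("location", "").lower()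
--             if "membrane" in loc_name or "plasma membrane" in loc_name:
--                 location_set.add("Membrane")
--             elif "nucleus" in loc_name:
--                 location_set.add("Nucleus")
--             elif "cytoplasm" in loc_name or "cytosol" in loc_name:
--                 location_set.add("Cytoplasm")
--             elif "secreted" in loc_name or "extracellular" in loc_name:
--                 location_set.add("Secreted")
--
--         # Priority: Membrane > Nucleus > Secreted > Cytoplasm
--         for priority_loc in ["Membrane", "Nucleus", "Secreted", "Cytoplasm"]:
--             if priority_loc in location_set:
--                 return priority_loc
--
--         if location_set:
--             return list(location_set)[0]
--
--     return "Unknown"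
-- ===== SOURCE B (Python) =====
-- _CATS = ["Membrane", "Nucleus", "Secreted", "Cytoplasm"]
--
--
-- def _rank(name):
--     # Same first-match chain as the original classifier, mapped to a
--     # priority rank (lower = higher priority); 4 = no match.
--     if "membrane" in name:  # "plasma membrane" already contains "membrane"
--         return 0
--     elif "nucleus" in name:
--         return 1
--     elif "cytoplasm" in name or "cytosol" in name:
--         return 3
--     elif "secreted" in name or "extracellular" in name:
--         return 2
--     else:
--         return 4
--
--
-- def _extract_subcellular_location(target_data):
--     best = 4
--     for loc in target_data.get("subcellularLocations", []):
--         r = _rank(loc.get("location", "").lower())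
--         if r < best:
--             best = r
--     return _CATS[best] if best < 4 else "Unknown"
-- ===== Notes on version B (the rewrite author's own statement) =====
-- stated objective: simpler
-- what changed: Replaces the intermediate set plus second priority-scan loop with a single pass that maps each location name to a priority rank and keeps the minimum, indexing the category table at the end.
import Mathlib
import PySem

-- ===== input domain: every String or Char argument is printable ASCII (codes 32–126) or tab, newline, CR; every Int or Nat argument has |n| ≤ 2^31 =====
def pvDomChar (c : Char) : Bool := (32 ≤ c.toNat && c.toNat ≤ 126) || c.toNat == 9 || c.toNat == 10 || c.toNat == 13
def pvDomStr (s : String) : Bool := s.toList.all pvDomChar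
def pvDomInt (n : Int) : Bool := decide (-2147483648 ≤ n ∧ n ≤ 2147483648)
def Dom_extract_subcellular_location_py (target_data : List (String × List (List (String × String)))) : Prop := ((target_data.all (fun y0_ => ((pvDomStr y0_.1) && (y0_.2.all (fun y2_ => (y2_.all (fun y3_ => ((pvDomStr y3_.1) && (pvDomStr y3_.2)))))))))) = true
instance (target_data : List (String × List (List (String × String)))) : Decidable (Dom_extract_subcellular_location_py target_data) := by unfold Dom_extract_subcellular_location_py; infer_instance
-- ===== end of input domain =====

-- B replaces A's intermediate set and second priority-scan loop with a single pass keeping the minimum priority rank (simpler decomposition).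


-- ===== PORT A =====
def extract_subcellular_location_py (target_data : List (String × List (List (String × String)))) : String :=
  let locations := PySem.Dict.getD (PySem.Dict.mk target_data) "subcellularLocations" []
  if locations ≠ [] then
    let location_set : PySem.Set String :=
      locations.foldl (fun s loc =>
        let loc_name := PySem.Str.lower (PySem.Dict.getD (PySem.Dict.mk loc) "location" "")
        if PySem.Str.isIn "membrane" loc_name || PySem.Str.isIn "plasma membrane" loc_name then
          PySem.Set.add s "Membrane"
        else if PySem.Str.isIn "nucleus" loc_name then
          PySem.Set.add s "Nucleus"
        else if PySem.Str.isIn "cytoplasm" loc_name || PySem.Str.isIn "cytosol" loc_name then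
          PySem.Set.add s "Cytoplasm"
        else if PySem.Str.isIn "secreted" loc_name || PySem.Str.isIn "extracellular" loc_name then
          PySem.Set.add s "Secreted"
        else s) PySem.Set.empty
    -- 'for priority_loc in [...]: if priority_loc in location_set: return priority_loc' — early-return loop as find?
    match (["Membrane", "Nucleus", "Secreted", "Cytoplasm"] : List String).find?
        (fun p => PySem.Set.contains location_set p) with
    | some p => p
    | none =>
      -- 'if location_set: return list(location_set)[0]' — unreachable in fact (the set only ever holds the
      -- four category names, so the scan above finds one); ported as the first element of the Set's list.
      match location_set with
      | x :: _ => x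
      | [] => "Unknown"
  else "Unknown"

-- ===== PORT B =====
def pvRank (name : String) : Int :=
  if PySem.Str.isIn "membrane" name then 0
  else if PySem.Str.isIn "nucleus" name then 1
  else if PySem.Str.isIn "cytoplasm" name || PySem.Str.isIn "cytosol" name then 3
  else if PySem.Str.isIn "secreted" name || PySem.Str.isIn "extracellular" name then 2
  else 4

def extract_subcellular_location_py_alt (target_data : List (String × List (List (String × String)))) : String :=
  let best : Int :=
    (PySem.Dict.getD (PySem.Dict.mk target_data) "subcellularLocations" []).foldl
      (fun best loc =>
        let r := pvRank (PySem.Str.lower (PySem.Dict.getD (PySem.Dict.mk loc) "location" ""))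
        if r < best then r else best) 4
  if best < 4 then
    PySem.List.pyGetD (["Membrane", "Nucleus", "Secreted", "Cytoplasm"] : List String) best "Unknown"
  else "Unknown"

-- ===== PRECONDITION & SPEC =====
def Spec_extract_subcellular_location_py (target_data : List (String × List (List (String × String)))) (out : String) : Prop := out = extract_subcellular_location_py_alt target_data
instance (target_data : List (String × List (List (String × String)))) (out : String) : Decidable (Spec_extract_subcellular_location_py target_data out) := by unfold Spec_extract_subcellular_location_py; infer_instance

-- ===== CLAIM (what is proved, stated in full; the proofs are below) =====
def Claim_equal_extract_subcellular_location_py : Prop := ∀ (target_data : List (String × List (List (String × String)))), Dom_extract_subcellular_location_py target_data → Spec_extract_subcellular_location_py target_data (extract_subcellular_location_py target_data)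

-- ===== LEMMAS AND PROOFS =====

-- A's per-location step and B's per-location step, named for the proofs
def pvStepA (s : PySem.Set String) (loc : List (String × String)) : PySem.Set String :=
  let loc_name := PySem.Str.lower (PySem.Dict.getD (PySem.Dict.mk loc) "location" "")
  if PySem.Str.isIn "membrane" loc_name || PySem.Str.isIn "plasma membrane" loc_name then
    PySem.Set.add s "Membrane"
  else if PySem.Str.isIn "nucleus" loc_name then
    PySem.Set.add s "Nucleus"
  else if PySem.Str.isIn "cytoplasm" loc_name || PySem.Str.isIn "cytosol" loc_name then
    PySem.Set.add s "Cytoplasm"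
  else if PySem.Str.isIn "secreted" loc_name || PySem.Str.isIn "extracellular" loc_name then
    PySem.Set.add s "Secreted"
  else s

def pvStepB (best : Int) (loc : List (String × String)) : Int :=
  let r := pvRank (PySem.Str.lower (PySem.Dict.getD (PySem.Dict.mk loc) "location" ""))
  if r < best then r else best

def pvCats : List String := ["Membrane", "Nucleus", "Secreted", "Cytoplasm"]

-- priority rank of a set of category names (4 = none of the four present)
def pvRkOf (s : List String) : Int :=
  if "Membrane" ∈ s then 0
  else if "Nucleus" ∈ s then 1
  else if "Secreted" ∈ s then 2
  else if "Cytoplasm" ∈ s then 3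
  else 4

theorem pv_rk_bounds (s : List String) : 0 ≤ pvRkOf s ∧ pvRkOf s ≤ 4 := by
  unfold pvRkOf; split_ifs <;> omega

theorem pv_sub_imp (name : String)
    (h : PySem.Str.isIn "plasma membrane" name = true) :
    PySem.Str.isIn "membrane" name = true := by
  rw [PySem.Str.isIn_iff_infix] at h ⊢
  exact List.IsInfix.trans (by decide) h

theorem pv_step_sub (s : PySem.Set String) (loc : List (String × String))
    (hs : ∀ x ∈ s, x ∈ pvCats) : ∀ x ∈ pvStepA s loc, x ∈ pvCats := by
  intro x hx
  simp only [pvStepA] at hx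
  split_ifs at hx <;>
    first
      | exact hs x hx
      | (rw [PySem.Set.mem_add] at hx
         rcases hx with hx | hx
         · exact hs x hx
         · simp [hx, pvCats])

theorem pv_rk_add (s : List String) (c : String) (hc : c ∈ pvCats) :
    pvRkOf (PySem.Set.add s c) = min (pvRkOf [c]) (pvRkOf s) := by
  have hmem : ∀ (x : String), x ∈ PySem.Set.add s c ↔ x ∈ s ∨ x = c := by
    intro x; rw [PySem.Set.mem_add]
  fin_cases hc <;>
    (simp only [pvRkOf, hmem, List.mem_singleton]
     split_ifs <;> simp_all)

theorem pv_step_rk (s : PySem.Set String) (loc : List (String × String)) :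
    pvStepB (pvRkOf s) loc = pvRkOf (pvStepA s loc) := by
  unfold pvStepA pvStepB
  set name := PySem.Str.lower (PySem.Dict.getD (PySem.Dict.mk loc) "location" "") with hname
  obtain ⟨h0, h4⟩ := pv_rk_bounds s
  by_cases h1 : PySem.Str.isIn "membrane" name = true
  · simp only [pvRank, h1, if_pos, Bool.true_or]
    rw [pv_rk_add s "Membrane" (by simp [pvCats])]
    simp only [pvRkOf, List.mem_singleton]
    split_ifs <;> simp_all
  · have hpm : PySem.Str.isIn "plasma membrane" name = false := by
      by_contra h
      exact h1 (pv_sub_imp name (by revert h; cases PySem.Str.isIn "plasma membrane" name <;> simp))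
    simp only [pvRank, h1, hpm, Bool.false_eq_true, Bool.or_self, if_false]
    by_cases h2 : PySem.Str.isIn "nucleus" name = true
    · simp only [h2, if_true]
      rw [pv_rk_add s "Nucleus" (by simp [pvCats])]
      simp only [pvRkOf, List.mem_singleton]
      split_ifs <;> simp_all
    · simp only [h2, Bool.false_eq_true, if_false]
      by_cases h3 : (PySem.Str.isIn "cytoplasm" name || PySem.Str.isIn "cytosol" name) = true
      · simp only [h3, if_true]
        rw [pv_rk_add s "Cytoplasm" (by simp [pvCats])]
        simp only [pvRkOf, List.mem_singleton]
        split_ifs <;> simp_all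
      · simp only [h3, Bool.false_eq_true, if_false]
        by_cases h4' : (PySem.Str.isIn "secreted" name || PySem.Str.isIn "extracellular" name) = true
        · simp only [h4', if_true]
          rw [pv_rk_add s "Secreted" (by simp [pvCats])]
          simp only [pvRkOf, List.mem_singleton]
          split_ifs <;> simp_all
        · simp only [h4', Bool.false_eq_true, if_false]
          split_ifs <;> omega

theorem pv_fold_ok (locs : List (List (String × String))) (s : PySem.Set String)
    (hs : ∀ x ∈ s, x ∈ pvCats) :
    (∀ x ∈ locs.foldl pvStepA s, x ∈ pvCats) ∧
      locs.foldl pvStepB (pvRkOf s) = pvRkOf (locs.foldl pvStepA s) := by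
  induction locs generalizing s with
  | nil => exact ⟨hs, rfl⟩
  | cons loc rest ih =>
    simp only [List.foldl_cons]
    rw [pv_step_rk s loc]
    exact ih (pvStepA s loc) (pv_step_sub s loc hs)

theorem pv_final (s : PySem.Set String) :
    (∀ x ∈ s, x ∈ pvCats) →
    (match (["Membrane", "Nucleus", "Secreted", "Cytoplasm"] : List String).find?
        (fun p => PySem.Set.contains s p) with
      | some p => p
      | none => match s with | x :: _ => x | [] => "Unknown") =
    (if pvRkOf s < 4 then
        PySem.List.pyGetD (["Membrane", "Nucleus", "Secreted", "Cytoplasm"] : List String) (pvRkOf s) "Unknown"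
      else "Unknown") := by
  intro hs
  by_cases hM : "Membrane" ∈ s
  · simp [List.find?, PySem.Set.contains, pvRkOf, hM, PySem.List.pyGetD, PySem.List.pyGet?, PySem.List.pyIdx?]
  · by_cases hN : "Nucleus" ∈ s
    · simp [List.find?, PySem.Set.contains, pvRkOf, hM, hN, PySem.List.pyGetD, PySem.List.pyGet?, PySem.List.pyIdx?]
    · by_cases hS : "Secreted" ∈ s
      · simp [List.find?, PySem.Set.contains, pvRkOf, hM, hN, hS, PySem.List.pyGetD, PySem.List.pyGet?, PySem.List.pyIdx?]
      · by_cases hC : "Cytoplasm" ∈ s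
        · simp [List.find?, PySem.Set.contains, pvRkOf, hM, hN, hS, hC, PySem.List.pyGetD, PySem.List.pyGet?, PySem.List.pyIdx?]
        · have hnil : s = [] := by
            cases s with
            | nil => rfl
            | cons x xs =>
              exfalso
              have := hs x (by simp)
              simp [pvCats] at this
              rcases this with h | h | h | h <;> subst h <;>
                [exact hM (by simp); exact hN (by simp); exact hS (by simp); exact hC (by simp)]
          subst hnil
          simp [List.find?, PySem.Set.contains, pvRkOf]

-- ===== VERDICT (by name: the statement is the Claim_ definition above) =====
theorem extract_subcellular_location_py_spec : Claim_equal_extract_subcellular_location_py := by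
  intro target_data _
  unfold Spec_extract_subcellular_location_py
  show extract_subcellular_location_py target_data = _
  unfold extract_subcellular_location_py extract_subcellular_location_py_alt
  have hA : (fun (s : PySem.Set String) (loc : List (String × String)) =>
      let loc_name := PySem.Str.lower (PySem.Dict.getD (PySem.Dict.mk loc) "location" "")
      if PySem.Str.isIn "membrane" loc_name || PySem.Str.isIn "plasma membrane" loc_name then
        PySem.Set.add s "Membrane"
      else if PySem.Str.isIn "nucleus" loc_name then
        PySem.Set.add s "Nucleus"
      else if PySem.Str.isIn "cytoplasm" loc_name || PySem.Str.isIn "cytosol" loc_name then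
        PySem.Set.add s "Cytoplasm"
      else if PySem.Str.isIn "secreted" loc_name || PySem.Str.isIn "extracellular" loc_name then
        PySem.Set.add s "Secreted"
      else s) = pvStepA := rfl
  have hB : (fun (best : Int) (loc : List (String × String)) =>
      let r := pvRank (PySem.Str.lower (PySem.Dict.getD (PySem.Dict.mk loc) "location" ""))
      if r < best then r else best) = pvStepB := rfl
  simp only [hA, hB]
  generalize PySem.Dict.getD (PySem.Dict.mk target_data) "subcellularLocations" [] = locs
  have hempty : pvRkOf PySem.Set.empty = 4 := rfl
  obtain ⟨hsub, hfold⟩ := pv_fold_ok locs PySem.Set.empty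
    (by intro x hx; simp [PySem.Set.empty] at hx)
  rw [hempty] at hfold
  rw [hfold]
  by_cases hne : locs = []
  · subst hne
    simp [pvRkOf, PySem.Set.empty]
  · simp only [hne, ne_eq, not_false_eq_true, if_true]
    exact pv_final _ hsub
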